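-- pv_equiv track=rewrite | github.com/Hulyamr13/hackerrank | A Chocolate Fiesta.py | solve
-- ===== SOURCE A (Python) =====
-- def solve(a):
--     # Write your code here
--     mod = pow(10, 9) + 7
--     c = 0
--     for i in a:
--         if i % 2 == 1:
--             c = 1
--             break
--
--     r = 1
--     for i in range(1, len(a) - c + 1):
--         r = (r * 2) % mod
--
--     return (r - 1)
-- ===== SOURCE B (Python) =====
-- def solve(a):
--     # DP: count subsets by sum parity. e = #even-sum subsets, o = #odd-sum subsets.
--     mod = 10**9 + 7
--     e, o = 1, 0  # the empty subset has even sum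
--     for x in a:
--         if x % 2 == 1:
--             e, o = (e + o) % mod, (o + e) % mod
--         else:
--             e, o = (e * 2) % mod, (o * 2) % mod
--     return e - 1  # drop the empty subset
-- ===== Notes on version B (the rewrite author's own statement) =====
-- stated objective: alternative
-- what changed: Instead of A's odd-flag scan followed by a doubling loop realizing the closed formula 2^(n-c)-1, B runs a single-pass dynamic program that directly counts even-sum and odd-sum subsets modulo 1e9+7 and returns the even count minus one (the empty subset).
import Mathlib
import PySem

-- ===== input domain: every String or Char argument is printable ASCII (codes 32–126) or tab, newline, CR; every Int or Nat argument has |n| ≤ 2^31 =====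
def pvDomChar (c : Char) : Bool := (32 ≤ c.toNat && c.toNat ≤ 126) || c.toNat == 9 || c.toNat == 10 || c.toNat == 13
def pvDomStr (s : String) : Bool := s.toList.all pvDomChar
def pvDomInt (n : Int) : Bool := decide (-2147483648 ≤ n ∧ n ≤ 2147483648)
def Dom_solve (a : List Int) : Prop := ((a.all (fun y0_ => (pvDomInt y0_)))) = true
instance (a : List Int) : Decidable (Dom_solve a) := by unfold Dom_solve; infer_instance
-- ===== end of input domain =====

-- B replaces A's odd-flag scan + doubling loop (the formula 2^(n-c)-1) by a one-pass DP that
-- counts even-sum and odd-sum subsets directly; same value everywhere (objective: alternative).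

-- ===== PORT A =====
-- A's first loop ('for i in a: if i % 2 == 1: c = 1; break')
def solveOddFlag : List Int → Int
  | [] => 0
  | i :: rest => if PySem.Int.mod i 2 == 1 then 1 else solveOddFlag rest

def solve (a : List Int) : Int :=
  let md : Int := 10 ^ 9 + 7
  let c : Int := solveOddFlag a
  let r : Int := (PySem.List.pyRange 1 ((a.length : Int) - c + 1) 1).foldl
    (fun r _ => PySem.Int.mod (r * 2) md) 1
  r - 1

-- ===== PORT B =====
-- B's loop body: one DP step on the pair (even-sum count, odd-sum count)
def solveStep (s : Int × Int) (x : Int) : Int × Int :=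
  if PySem.Int.mod x 2 == 1 then
    (PySem.Int.mod (s.1 + s.2) (10 ^ 9 + 7), PySem.Int.mod (s.2 + s.1) (10 ^ 9 + 7))
  else
    (PySem.Int.mod (s.1 * 2) (10 ^ 9 + 7), PySem.Int.mod (s.2 * 2) (10 ^ 9 + 7))

def solve_alt (a : List Int) : Int :=
  (a.foldl solveStep (1, 0)).1 - 1

-- ===== PRECONDITION & SPEC =====
def Spec_solve (a : List Int) (out : Int) : Prop := out = solve_alt a
instance (a : List Int) (out : Int) : Decidable (Spec_solve a out) := by unfold Spec_solve; infer_instance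

-- ===== CLAIM (what is proved, stated in full; the proofs are below) =====
def Claim_equal_solve : Prop := ∀ (a : List Int), Dom_solve a → Spec_solve a (solve a)

-- ===== LEMMAS AND PROOFS =====

-- A's break loop as an any()-style flag
theorem solveOddFlag_eq_any (a : List Int) :
    solveOddFlag a = if a.any (fun x => PySem.Int.mod x 2 == 1) then 1 else 0 := by
  induction a with
  | nil => rfl
  | cons x rest ih =>
    simp only [solveOddFlag, List.any_cons, Bool.or_eq_true]
    by_cases h : x % 2 = 1 <;> simp [h, ih]

-- the flag is 0 or 1, and bounded by the length
theorem solveOddFlag_bounds (a : List Int) :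
    0 ≤ solveOddFlag a ∧ solveOddFlag a ≤ (a.length : Int) := by
  induction a with
  | nil => exact ⟨le_refl 0, le_refl 0⟩
  | cons x rest ih =>
    obtain ⟨ih0, ih1⟩ := ih
    simp only [solveOddFlag, List.length_cons]
    by_cases h : PySem.Int.mod x 2 == 1
    · rw [if_pos h]
      refine ⟨by norm_num, ?_⟩
      have hx : 1 ≤ (x :: rest).length := by simp
      exact_mod_cast hx
    · rw [if_neg h]
      refine ⟨ih0, ih1.trans ?_⟩
      have hx : rest.length ≤ (x :: rest).length := by simp
      exact_mod_cast hx

-- A's doubling loop computes 2^k mod (10^9+7)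
theorem doubling_loop (k : Nat) :
    (PySem.List.pyRange 1 ((k : Int) + 1) 1).foldl
      (fun r _ => PySem.Int.mod (r * 2) (10 ^ 9 + 7)) 1
      = (2 ^ k) % (10 ^ 9 + 7) := by
  induction k with
  | zero => decide
  | succ k ih =>
    have hrange : PySem.List.pyRange 1 ((↑(k + 1) : Int) + 1) 1
        = PySem.List.pyRange 1 ((k : Int) + 1) 1 ++ [(k : Int) + 1] := by
      have := PySem.List.pyRange_one_succ_right (a := 1) (b := (k : Int) + 1) (by omega)
      simpa [add_assoc, push_cast] using this
    rw [hrange, List.foldl_append, ih]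
    simp only [List.foldl]
    rw [PySem.Int.mod_eq_emod_of_pos (show (0:Int) < 10 ^ 9 + 7 by norm_num)]
    rw [pow_succ 2 k]
    conv_rhs => rw [Int.mul_emod]
    rw [show ((2:Int) % (10 ^ 9 + 7)) = 2 from by decide]

-- once both components are equal, every further step just doubles the common value
theorem solveStep_both (rest : List Int) (v : Int) :
    rest.foldl solveStep (v % (10 ^ 9 + 7), v % (10 ^ 9 + 7))
      = ((2 ^ rest.length * v) % (10 ^ 9 + 7), (2 ^ rest.length * v) % (10 ^ 9 + 7)) := by
  induction rest generalizing v with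
  | nil => simp
  | cons x rest ih =>
    have hP : (0:Int) < 10 ^ 9 + 7 := by norm_num
    have hstep : solveStep (v % (10 ^ 9 + 7), v % (10 ^ 9 + 7)) x
        = ((2 * v) % (10 ^ 9 + 7), (2 * v) % (10 ^ 9 + 7)) := by
      simp only [solveStep, PySem.Int.mod_eq_emod_of_pos hP]
      have h1 : (v % (10 ^ 9 + 7) + v % (10 ^ 9 + 7)) % (10 ^ 9 + 7) = (2 * v) % (10 ^ 9 + 7) := by
        omega
      have h2 : (v % (10 ^ 9 + 7) * 2) % (10 ^ 9 + 7) = (2 * v) % (10 ^ 9 + 7) := by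
        rw [mul_comm]
        omega
      split_ifs <;> simp only [h1, h2]
    rw [List.foldl_cons, hstep, ih (2 * v)]
    have : 2 ^ rest.length * (2 * v) = 2 ^ (x :: rest).length * v := by
      simp [List.length_cons, pow_succ]; ring
    rw [this]

-- invariant of B's DP from the state (2^k mod p, 0)
theorem solveStep_invariant (rest : List Int) (k : Nat) :
    rest.foldl solveStep (2 ^ k % (10 ^ 9 + 7), 0)
      = if rest.any (fun x => PySem.Int.mod x 2 == 1) then
          (2 ^ (k + rest.length - 1) % (10 ^ 9 + 7), 2 ^ (k + rest.length - 1) % (10 ^ 9 + 7))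
        else (2 ^ (k + rest.length) % (10 ^ 9 + 7), 0) := by
  induction rest generalizing k with
  | nil => simp
  | cons x rest ih =>
    have hP : (0:Int) < 10 ^ 9 + 7 := by norm_num
    by_cases h : (PySem.Int.mod x 2 == 1) = true
    · -- x odd: both components become 2^k mod p, then solveStep_both finishes
      have hstep : solveStep (2 ^ k % (10 ^ 9 + 7), 0) x
          = ((2 ^ k : Int) % (10 ^ 9 + 7), (2 ^ k : Int) % (10 ^ 9 + 7)) := by
        simp only [solveStep, if_pos h, PySem.Int.mod_eq_emod_of_pos hP]
        simp [Int.emod_emod_of_dvd]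
      rw [List.foldl_cons, hstep, solveStep_both rest (2 ^ k)]
      have hcond : (x :: rest).any (fun x => PySem.Int.mod x 2 == 1) = true := by
        simp only [List.any_cons, h, Bool.true_or]
      rw [hcond, if_pos rfl]
      have he : (2:Int) ^ rest.length * 2 ^ k = 2 ^ (k + (x :: rest).length - 1) := by
        rw [← pow_add]
        congr 1
        simp only [List.length_cons]
        omega
      rw [he]
    · -- x even: state doubles, apply IH with k+1
      have hf : (PySem.Int.mod x 2 == 1) = false := by simpa using h
      have hstep : solveStep (2 ^ k % (10 ^ 9 + 7), 0) x
          = ((2 ^ (k + 1) : Int) % (10 ^ 9 + 7), 0) := by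
        simp only [solveStep, hf, Bool.false_eq_true, if_false,
          PySem.Int.mod_eq_emod_of_pos hP, Prod.mk.injEq]
        refine ⟨?_, by decide⟩
        rw [pow_succ 2 k]
        generalize (2:Int) ^ k = t
        omega
      rw [List.foldl_cons, hstep, ih (k + 1)]
      have hcond : (x :: rest).any (fun x => PySem.Int.mod x 2 == 1)
          = rest.any (fun x => PySem.Int.mod x 2 == 1) := by
        simp only [List.any_cons, hf, Bool.false_or]
      rw [hcond]
      simp only [List.length_cons]
      rw [show k + 1 + rest.length = k + (rest.length + 1) from by omega]

-- ===== VERDICT (by name: the statement is the Claim_ definition above) =====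
theorem solve_spec : Claim_equal_solve := by
  intro a _
  show solve a = solve_alt a
  simp only [solve, solve_alt]
  obtain ⟨h0, h1⟩ := solveOddFlag_bounds a
  rw [show (a.length : Int) - solveOddFlag a + 1
        = (((a.length : Int) - solveOddFlag a).toNat : Int) + 1 by omega]
  rw [doubling_loop]
  rw [show ((1 : Int), (0 : Int)) = ((2 ^ 0 : Int) % (10 ^ 9 + 7), (0 : Int)) from by decide]
  rw [solveStep_invariant a 0, solveOddFlag_eq_any a]
  by_cases hany : a.any (fun x => PySem.Int.mod x 2 == 1)
  · have hne : a ≠ [] := by rintro rfl; simp at hany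
    have hlen : 1 ≤ a.length := List.length_pos_iff.mpr hne
    simp only [if_pos hany]
    rw [show ((a.length : Int) - 1).toNat = 0 + a.length - 1 from by omega]
  · simp only [if_neg hany]
    rw [show ((a.length : Int) - 0).toNat = 0 + a.length from by omega]
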